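-- pv_equiv track=rewrite | github.com/miguel-kjh/rag-experiments | src/ranking_metrics.py | _rank_of_relevant_single
-- ===== SOURCE A (Python) =====
-- from typing import List, Sequence, Iterable, Dict, Optional
--
-- def _rank_of_relevant_single(pred_ranked: Sequence, gt: Sequence) -> Optional[int]:
--     """Rango 1-based del (único) relevante; None si no aparece."""
--     gt_set = set(gt)
--     r = 0
--     seen = set()
--     for item in pred_ranked:
--         if item in seen:
--             continue
--         seen.add(item)
--         r += 1
--         if item in gt_set:
--             return r
--     return None
-- ===== SOURCE B (Python) =====
-- def _rank_of_relevant_single(pred_ranked, gt):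
--     """Rank (1-based) of the unique relevant item; None if it never appears.
--
--     Different algorithm than the seen-set loop: the first relevant hit in
--     pred_ranked is necessarily a first occurrence, so its dedup-rank equals
--     the number of distinct items in the prefix up to and including it.
--     """
--     gt_set = set(gt)
--     j = next((i for i, x in enumerate(pred_ranked) if x in gt_set), None)
--     if j is None:
--         return None
--     return len(set(pred_ranked[:j + 1]))
-- ===== Notes on version B (the rewrite author's own statement) =====
-- stated objective: alternative
-- what changed: Instead of deduplicating while scanning with a seen-set and counter, B first locates the raw index of the first relevant prediction (no dedup at all), then computes the rank as the number of distinct elements in that prefix (len(set(prefix))); correct because the first relevant hit is always a first occurrence.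
import Mathlib
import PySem

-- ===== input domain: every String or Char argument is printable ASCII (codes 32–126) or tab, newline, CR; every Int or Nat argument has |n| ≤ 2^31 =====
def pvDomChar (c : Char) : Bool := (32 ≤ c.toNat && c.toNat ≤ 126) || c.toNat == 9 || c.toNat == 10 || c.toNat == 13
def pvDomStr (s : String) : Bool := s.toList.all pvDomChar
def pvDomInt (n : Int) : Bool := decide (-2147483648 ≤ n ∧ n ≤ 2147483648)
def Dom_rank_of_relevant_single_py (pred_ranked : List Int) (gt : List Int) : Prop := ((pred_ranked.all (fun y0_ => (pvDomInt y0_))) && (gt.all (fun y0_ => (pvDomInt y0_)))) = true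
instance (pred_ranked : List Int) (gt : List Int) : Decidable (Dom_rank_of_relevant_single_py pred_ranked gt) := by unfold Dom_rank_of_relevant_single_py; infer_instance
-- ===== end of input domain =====

-- B replaces A's interleaved seen-set loop by a different algorithm: find the raw index of the
-- first relevant prediction, then return the number of distinct elements in that prefix.


-- ===== PORT A =====
-- A's loop: skip items already seen, else add to seen, bump r, return r if relevant.
def rankGoA (gt_set : PySem.Set Int) : List Int → PySem.Set Int → Int → Option Int
  | [], _, _ => none
  | item :: rest, seen, r =>
    if PySem.Set.contains seen item then
      rankGoA gt_set rest seen r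
    else
      let seen' := PySem.Set.add seen item
      let r' := r + 1
      if PySem.Set.contains gt_set item then some r'
      else rankGoA gt_set rest seen' r'

def rank_of_relevant_single_py (pred_ranked : List Int) (gt : List Int) : Option Int :=
  rankGoA (PySem.Set.ofList gt) pred_ranked PySem.Set.empty 0

-- ===== PORT B =====
-- j = next((i for i, x in enumerate(pred_ranked) if x in gt_set), None)
def firstHitB (gt_set : PySem.Set Int) : List Int → Int → Option Int
  | [], _ => none
  | x :: xs, i => if PySem.Set.contains gt_set x then some i else firstHitB gt_set xs (i + 1)

def rank_of_relevant_single_py_alt (pred_ranked : List Int) (gt : List Int) : Option Int :=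
  let gt_set := PySem.Set.ofList gt
  match firstHitB gt_set pred_ranked 0 with
  | none => none
  | some j => some ((PySem.Set.ofList (PySem.List.slice pred_ranked none (some (j + 1)))).length)   -- len(set(pred_ranked[:j+1]))

-- ===== PRECONDITION & SPEC =====
def Spec_rank_of_relevant_single_py (pred_ranked : List Int) (gt : List Int) (out : Option Int) : Prop := out = rank_of_relevant_single_py_alt pred_ranked gt
instance (pred_ranked : List Int) (gt : List Int) (out : Option Int) : Decidable (Spec_rank_of_relevant_single_py pred_ranked gt out) := by unfold Spec_rank_of_relevant_single_py; infer_instance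

-- ===== CLAIM =====
def Claim_equal_rank_of_relevant_single_py : Prop := ∀ (pred_ranked : List Int) (gt : List Int), Dom_rank_of_relevant_single_py pred_ranked gt → Spec_rank_of_relevant_single_py pred_ranked gt (rank_of_relevant_single_py pred_ranked gt)

-- ===== LEMMAS AND PROOFS =====
-- index (as Nat) of the first element of xs that is in g
def firstIdxN (g : PySem.Set Int) : List Int → Option Nat
  | [] => none
  | x :: xs => if PySem.Set.contains g x then some 0 else (firstIdxN g xs).map (· + 1)

lemma firstHitB_eq (g : PySem.Set Int) (xs : List Int) : ∀ (i : Int),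
    firstHitB g xs i = (firstIdxN g xs).map (fun k => i + (k : Int)) := by
  induction xs with
  | nil => intro i; simp [firstHitB, firstIdxN]
  | cons x xs ih =>
    intro i
    simp only [firstHitB, firstIdxN]
    by_cases h : x ∈ g
    · have h' : PySem.Set.contains g x = true := by simpa [PySem.Set.contains] using h
      simp [h]
    · have h' : ¬ PySem.Set.contains g x = true := by simpa [PySem.Set.contains] using h
      simp only [h', if_neg, ih (i + 1)]
      cases firstIdxN g xs with
      | none => simp
      | some k => simp; ring

lemma goA_eq (g : PySem.Set Int) (xs : List Int) : ∀ (seen : PySem.Set Int),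
    (∀ y ∈ seen, ¬ PySem.Set.contains g y) →
    rankGoA g xs seen (seen.length : Int) =
      (firstIdxN g xs).map (fun k => (((xs.take (k + 1)).foldl PySem.Set.add seen).length : Int)) := by
  induction xs with
  | nil => intro seen _; simp [rankGoA, firstIdxN]
  | cons x xs ih =>
    intro seen hinv
    simp only [rankGoA, firstIdxN]
    by_cases hs : PySem.Set.contains seen x
    · have hxseen : x ∈ seen := by simpa [PySem.Set.contains] using hs
      have hxg : ¬ PySem.Set.contains g x := hinv x hxseen
      have hadd : PySem.Set.add seen x = seen := by simp [PySem.Set.add, hxseen]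
      simp only [hs, if_pos, hxg, ih seen hinv]
      cases firstIdxN g xs with
      | none => simp
      | some k => simp [List.take_succ_cons, hadd]
    · by_cases hg : PySem.Set.contains g x
      · have hxseen : x ∉ seen := by simpa [PySem.Set.contains] using hs
        simp only [hs, hg, if_neg, Option.map_some]
        simp [List.take_succ_cons, PySem.Set.add, hxseen]
      · have hxseen : x ∉ seen := by simpa [PySem.Set.contains] using hs
        have hinv' : ∀ y ∈ PySem.Set.add seen x, ¬ PySem.Set.contains g y := by
          intro y hy
          simp [PySem.Set.add, hxseen] at hy
          rcases hy with hy | hy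
          · exact hinv y hy
          · subst hy; exact hg
        have hlen : ((PySem.Set.add seen x).length : Int) = (seen.length : Int) + 1 := by
          simp [PySem.Set.add, hxseen]
        simp only [hs, hg]
        rw [← hlen, ih (PySem.Set.add seen x) hinv']
        cases firstIdxN g xs with
        | none => simp
        | some k => simp [List.take_succ_cons]

-- ===== VERDICT =====
theorem rank_of_relevant_single_py_spec : Claim_equal_rank_of_relevant_single_py := by
  intro pred_ranked gt _
  show rank_of_relevant_single_py pred_ranked gt = rank_of_relevant_single_py_alt pred_ranked gt
  unfold rank_of_relevant_single_py rank_of_relevant_single_py_alt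
  have hA : rankGoA (PySem.Set.ofList gt) pred_ranked PySem.Set.empty 0 =
      (firstIdxN (PySem.Set.ofList gt) pred_ranked).map
        (fun k => (((pred_ranked.take (k + 1)).foldl PySem.Set.add PySem.Set.empty).length : Int)) := by
    have := goA_eq (PySem.Set.ofList gt) pred_ranked PySem.Set.empty
      (by intro y hy; simp [PySem.Set.empty] at hy)
    simpa [PySem.Set.empty] using this
  rw [hA]
  simp only [firstHitB_eq]
  cases hk : firstIdxN (PySem.Set.ofList gt) pred_ranked with
  | none => simp
  | some k =>
    simp only [Option.map_some]
    have hsl : PySem.List.slice pred_ranked none (some ((k : Int) + 1)) = pred_ranked.take (k + 1) := by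
      have h1 : ((k : Int) + 1) = ((k + 1 : Nat) : Int) := by push_cast; ring
      rw [h1, PySem.List.slice_to_natCast]
    simp [hsl, PySem.Set.ofList_eq_foldl, PySem.Set.empty]
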